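-- pv_equiv track=rewrite | github.com/apconole/ovs | utilities/analyze-patch.py | get_last_subject
-- ===== SOURCE A (Python) =====
-- def get_last_subject(patch_content: str) -> str | None:
--     """Extract subject from the last patch in an mbox."""
--     # Find all Subject lines with potential continuations
--     subjects = []
--     lines = patch_content.split("\n")
--     i = 0
--     while i < len(lines):
--         if lines[i].lower().startswith("subject:"):
--             subject = lines[i][8:].strip()
--             i += 1
--             # Handle continuation lines (RFC 2822 folding)
--             while i < len(lines) and lines[i].startswith((" ", "\t")):
--                 subject += " " + lines[i].strip()
--                 i += 1
--             subjects.append(subject)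
--         else:
--             i += 1
--     return subjects[-1] if subjects else None
-- ===== SOURCE B (Python) =====
-- def get_last_subject(patch_content: str) -> str | None:
--     """Extract subject from the last patch in an mbox (reverse scan, last subject only)."""
--     lines = patch_content.split("\n")
--     j = next((k for k in range(len(lines) - 1, -1, -1)
--               if lines[k].lower().startswith("subject:")), None)
--     if j is None:
--         return None
--     subject = lines[j][8:].strip()
--     for line in lines[j + 1:]:
--         if line.startswith((" ", "\t")):
--             subject += " " + line.strip()
--         else:
--             break
--     return subject
-- ===== Notes on version B (the rewrite author's own statement) =====
-- stated objective: alternative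
-- what changed: B replaces A's forward scan that collects a list of every folded subject with a single reverse scan that finds the last subject header line and folds only its continuation lines, never building the subjects list.
import Mathlib
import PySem

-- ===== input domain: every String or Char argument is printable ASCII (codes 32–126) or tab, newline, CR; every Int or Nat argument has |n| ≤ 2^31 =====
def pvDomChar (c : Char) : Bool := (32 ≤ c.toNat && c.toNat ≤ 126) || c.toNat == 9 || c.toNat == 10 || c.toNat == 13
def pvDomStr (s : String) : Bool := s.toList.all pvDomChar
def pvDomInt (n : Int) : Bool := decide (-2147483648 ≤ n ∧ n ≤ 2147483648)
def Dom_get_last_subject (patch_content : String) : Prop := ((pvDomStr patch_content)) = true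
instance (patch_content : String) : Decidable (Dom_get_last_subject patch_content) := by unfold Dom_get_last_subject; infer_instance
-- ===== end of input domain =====

-- B replaces A's forward scan that collects every subject with a reverse scan for
-- the last subject header line plus one continuation fold; same return value (alternative decomposition).

-- shared transliterations of the two Python line predicates
def pvIsSubj (l : String) : Bool := PySem.Str.startswith (PySem.Str.lower l) "subject:"
def pvIsCont (l : String) : Bool := PySem.Str.startswith l " " || PySem.Str.startswith l "\t"

-- ===== PORT A =====
-- inner while loop of A: consume continuation lines, return (subject, remaining lines)
def pvContA : List String → String → String × List String
  | [], s => (s, [])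
  | l :: rest, s =>
    if pvIsCont l then pvContA rest (s ++ " " ++ PySem.Str.strip l) else (s, l :: rest)

theorem pvContA_len (ls : List String) (s : String) : (pvContA ls s).2.length ≤ ls.length := by
  induction ls generalizing s with
  | nil => simp [pvContA]
  | cons l rest ih =>
    simp only [pvContA]
    split
    · exact le_trans (ih _) (Nat.le_succ _)
    · simp

-- outer while loop of A, collecting every subject in order
def pvScanA : List String → List String
  | [] => []
  | l :: rest =>
    if pvIsSubj l then
      (pvContA rest (PySem.Str.strip (PySem.Str.slice l (some 8) none))).1 ::
        pvScanA (pvContA rest (PySem.Str.strip (PySem.Str.slice l (some 8) none))).2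
    else pvScanA rest
termination_by ls => ls.length
decreasing_by
  · exact Nat.lt_succ_of_le (pvContA_len _ _)
  · simp

def get_last_subject (patch_content : String) : Option String :=
  let lines := (PySem.Str.split? patch_content "\n").getD []
  let subjects := pvScanA lines
  if subjects.isEmpty then none else PySem.List.pyGet? subjects (-1)

-- ===== PORT B =====
-- reverse scan: last line satisfying pvIsSubj, together with the lines after it
def pvFindLast : List String → Option (String × List String)
  | [] => none
  | l :: rest =>
    match pvFindLast rest with
    | some r => some r
    | none => if pvIsSubj l then some (l, rest) else none

-- B's continuation fold: extend the subject while lines start with ' ' or '\t'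
def pvContB : List String → String → String
  | [], s => s
  | l :: rest, s =>
    if pvIsCont l then pvContB rest (s ++ " " ++ PySem.Str.strip l) else s

def get_last_subject_alt (patch_content : String) : Option String :=
  let lines := (PySem.Str.split? patch_content "\n").getD []
  match pvFindLast lines with
  | none => none
  | some (l, rest) => some (pvContB rest (PySem.Str.strip (PySem.Str.slice l (some 8) none)))

-- ===== PRECONDITION & SPEC =====
def Spec_get_last_subject (patch_content : String) (out : Option String) : Prop := out = get_last_subject_alt patch_content
instance (patch_content : String) (out : Option String) : Decidable (Spec_get_last_subject patch_content out) := by unfold Spec_get_last_subject; infer_instance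

-- ===== CLAIM (what is proved, stated in full; the proofs are below) =====
def Claim_equal_get_last_subject : Prop := ∀ (patch_content : String), Dom_get_last_subject patch_content → Spec_get_last_subject patch_content (get_last_subject patch_content)

-- ===== LEMMAS AND PROOFS =====

-- a continuation line (starts with ' ' or '\t') is never a subject line
theorem pvCont_not_subj (l : String) (h : pvIsCont l = true) : pvIsSubj l = false := by
  simp only [pvIsCont, pvIsSubj, PySem.Str.startswith_eq, Bool.or_eq_true] at h ⊢
  rw [PySem.Str.toList_lower]
  rcases h with h | h <;>
  · rw [PySem.Chars.startswith_iff] at h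
    obtain ⟨t, ht⟩ := h
    simp only [← ht]
    simp [PySem.Chars.lower, PySem.Chars.startswith, PySem.Chars.lowerChar,
      PySem.Chars.isupper, List.isPrefixOf]

theorem pvContB_fst (ls : List String) (s : String) : (pvContA ls s).1 = pvContB ls s := by
  induction ls generalizing s with
  | nil => rfl
  | cons l rest ih =>
    simp only [pvContA, pvContB]
    split <;> simp [ih]

theorem pvFindLast_cons_not_subj (l : String) (rest : List String) (h : pvIsSubj l = false) :
    pvFindLast (l :: rest) = pvFindLast rest := by
  simp only [pvFindLast, h]
  cases pvFindLast rest <;> simp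

theorem pvFindLast_contA (ls : List String) (s : String) :
    pvFindLast (pvContA ls s).2 = pvFindLast ls := by
  induction ls generalizing s with
  | nil => rfl
  | cons l rest ih =>
    simp only [pvContA]
    split
    · next h => rw [ih, pvFindLast_cons_not_subj l rest (pvCont_not_subj l h)]
    · rfl

theorem pvScanA_nil_iff (ls : List String) : pvScanA ls = [] ↔ pvFindLast ls = none := by
  induction ls using pvScanA.induct with
  | case1 => simp [pvScanA, pvFindLast]
  | case2 l rest h ih =>
    simp only [pvScanA, h, if_true, pvFindLast]
    constructor
    · intro hc; exact absurd hc (by simp)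
    · intro hc
      cases hfr : pvFindLast rest <;> simp [hfr] at hc
  | case3 l rest h ih =>
    simp only [pvScanA]
    rw [if_neg h, ih, pvFindLast_cons_not_subj l rest (by simpa using h)]

def pvF (p : String × List String) : String :=
  pvContB p.2 (PySem.Str.strip (PySem.Str.slice p.1 (some 8) none))

theorem pvMain (ls : List String) :
    (pvScanA ls).getLast? = (pvFindLast ls).map pvF := by
  induction ls using pvScanA.induct with
  | case1 => simp [pvScanA, pvFindLast]
  | case2 l rest h ih =>
    simp only [pvScanA, h, if_true]
    by_cases hnil : pvScanA (pvContA rest (PySem.Str.strip (PySem.Str.slice l (some 8) none))).2 = []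
    · have hfn : pvFindLast rest = none := by
        rw [← pvFindLast_contA rest (PySem.Str.strip (PySem.Str.slice l (some 8) none))]
        exact (pvScanA_nil_iff _).mp hnil
      simp only [hnil, pvFindLast, hfn, h, if_true, List.getLast?_cons, List.getLast?_nil,
        Option.map_some, Option.getD_none]
      simp [pvF, pvContB_fst]
    · have hfs : pvFindLast rest ≠ none := by
        rw [← pvFindLast_contA rest (PySem.Str.strip (PySem.Str.slice l (some 8) none))]
        exact fun hc => hnil ((pvScanA_nil_iff _).mpr hc)
      obtain ⟨r, hr⟩ := Option.ne_none_iff_exists'.mp hfs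
      have : (pvScanA (pvContA rest (PySem.Str.strip (PySem.Str.slice l (some 8) none))).2).getLast?
          = some (pvF r) := by
        rw [ih, pvFindLast_contA, hr]; rfl
      rw [List.getLast?_cons, this]
      simp only [pvFindLast, hr, Option.map_some, Option.getD_some]
  | case3 l rest h ih =>
    simp only [pvScanA]
    rw [if_neg h, ih, pvFindLast_cons_not_subj l rest (by simpa using h)]

theorem pvLast_eq (xs : List String) :
    (if xs.isEmpty then (none : Option String) else PySem.List.pyGet? xs (-1)) = xs.getLast? := by
  cases xs with
  | nil => rfl
  | cons x t =>
    simp only [List.isEmpty_cons, Bool.false_eq_true, if_false]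
    rw [PySem.List.pyGet?_neg_ofNat (x :: t) 1 (by omega) (by simp)]
    rw [← List.getLast?_eq_getElem?]

theorem pvKey (lines : List String) :
    (if (pvScanA lines).isEmpty then (none : Option String)
     else PySem.List.pyGet? (pvScanA lines) (-1))
    = match pvFindLast lines with
      | none => none
      | some (l, rest) => some (pvContB rest (PySem.Str.strip (PySem.Str.slice l (some 8) none))) := by
  rw [pvLast_eq, pvMain]
  cases h : pvFindLast lines with
  | none => rfl
  | some r => cases r; rfl

-- ===== VERDICT (by name: the statement is the Claim_ definition above) =====
theorem get_last_subject_spec : Claim_equal_get_last_subject := by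
  intro p _
  unfold Spec_get_last_subject get_last_subject get_last_subject_alt
  exact pvKey _
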